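-- pv_equiv track=rewrite | github.com/russellE46/findFlatRoads | findRoads.py | max_elevation_delta
-- ===== SOURCE A (Python) =====
-- def max_elevation_delta(elevations):
--     maxD = 0
--     for i in range(0, len(elevations)):
--         for j in range(i + 1, len(elevations)):
--             d = elevations[i] - elevations[j]
--             if abs(d) > abs(maxD):
--                 maxD = d
--
--     return maxD
-- ===== SOURCE B (Python) =====
-- def max_elevation_delta(elevations):
--     if not elevations:
--         return 0
--     hi = max(elevations)
--     lo = min(elevations)
--     if hi == lo:
--         return 0
--     if elevations.index(hi) < elevations.index(lo):
--         return hi - lo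
--     return lo - hi
-- ===== Notes on version B (the rewrite author's own statement) =====
-- stated objective: faster
-- what changed: Replaces the quadratic all-pairs scan with a linear pass: the answer is max-min, signed by whichever extreme occurs first (earliest first-index).
import Mathlib
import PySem

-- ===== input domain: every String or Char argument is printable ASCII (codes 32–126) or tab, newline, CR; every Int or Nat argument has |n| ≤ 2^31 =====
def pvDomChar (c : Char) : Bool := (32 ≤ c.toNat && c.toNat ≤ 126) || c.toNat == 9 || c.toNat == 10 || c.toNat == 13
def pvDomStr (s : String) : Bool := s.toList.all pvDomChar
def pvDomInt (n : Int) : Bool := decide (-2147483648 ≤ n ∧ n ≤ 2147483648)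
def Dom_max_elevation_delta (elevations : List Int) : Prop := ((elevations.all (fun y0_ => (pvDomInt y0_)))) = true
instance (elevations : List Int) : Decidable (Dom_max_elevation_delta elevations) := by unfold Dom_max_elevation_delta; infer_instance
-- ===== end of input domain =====

-- B replaces A's quadratic all-pairs scan by one linear computation: the answer is max-min,
-- signed by whichever extreme value occurs first in the list (objective: faster, asymptotic).

-- ===== PORT A =====
def max_elevation_delta (elevations : List Int) : Int :=
  (PySem.List.pyRange 0 (elevations.length : Int) 1).foldl
    (fun maxD i =>
      (PySem.List.pyRange (i + 1) (elevations.length : Int) 1).foldl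
        (fun maxD j =>
          let d := PySem.List.pyGetD elevations i 0 - PySem.List.pyGetD elevations j 0
          if |d| > |maxD| then d else maxD)
        maxD)
    0

-- ===== PORT B =====
def max_elevation_delta_alt (elevations : List Int) : Int :=
  if elevations = [] then 0
  else
    match PySem.List.max? elevations (fun y => y), PySem.List.min? elevations (fun y => y) with
    | some hi, some lo =>
      if hi = lo then 0
      else
        match PySem.List.index? elevations hi, PySem.List.index? elevations lo with
        | some ih, some il => if ih < il then hi - lo else lo - hi
        | _, _ => 0
    | _, _ => 0

-- ===== PRECONDITION & SPEC =====
def Spec_max_elevation_delta (elevations : List Int) (out : Int) : Prop := out = max_elevation_delta_alt elevations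
instance (elevations : List Int) (out : Int) : Decidable (Spec_max_elevation_delta elevations out) := by unfold Spec_max_elevation_delta; infer_instance

-- ===== CLAIM (what is proved, stated in full; the proofs are below) =====
def Claim_equal_max_elevation_delta : Prop := ∀ (elevations : List Int), Dom_max_elevation_delta elevations → Spec_max_elevation_delta elevations (max_elevation_delta elevations)

-- ===== LEMMAS AND PROOFS =====

/-- One update step of A's loop: keep the new difference iff its absolute value strictly grows. -/
def pvStep (m d : Int) : Int := if |d| > |m| then d else m

/-- A's accumulator run over a list of candidate differences. -/
def pvBest (m : Int) (ds : List Int) : Int := ds.foldl pvStep m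

/-- All differences xs[i] - xs[j] (i < j) in A's iteration order. -/
def pvPairs : List Int → List Int
  | [] => []
  | x :: r => r.map (fun y => x - y) ++ pvPairs r

/-- Running maximum / minimum, as in `max(xs)` / `min(xs)`. -/
def pvMax (a : Int) (r : List Int) : Int := r.foldl max a
def pvMin (a : Int) (r : List Int) : Int := r.foldl min a

/-- max - min of a list (0 for []). -/
def pvD : List Int → Int
  | [] => 0
  | x :: r => pvMax x r - pvMin x r

/-- Signed span: max-min signed by whichever extreme occurs first. -/
def pvS : List Int → Int
  | [] => 0
  | x :: r =>
    if pvMax x r = pvMin x r then 0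
    else if x = pvMax x r then pvMax x r - pvMin x r
    else if x = pvMin x r then pvMin x r - pvMax x r
    else pvS r

lemma pvBest_keep (ds : List Int) : ∀ m, (∀ d ∈ ds, |d| ≤ |m|) → pvBest m ds = m := by
  induction ds with
  | nil => intro m _; rfl
  | cons d t ih =>
    intro m h
    have hd : |d| ≤ |m| := h d (by simp)
    have hs : pvStep m d = m := by unfold pvStep; rw [if_neg (by omega)]
    simp only [pvBest, List.foldl_cons, hs]
    exact ih m (fun x hx => h x (by simp [hx]))

lemma pvBest_bound (ds : List Int) : ∀ m v, |m| ≤ v → (∀ d ∈ ds, |d| ≤ v) → |pvBest m ds| ≤ v := by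
  induction ds with
  | nil => intro m v hm _; exact hm
  | cons d t ih =>
    intro m v hm h
    simp only [pvBest, List.foldl_cons]
    refine ih _ v ?_ (fun x hx => h x (by simp [hx]))
    unfold pvStep
    split
    · exact h d (by simp)
    · exact hm

lemma pvBest_hit (ds : List Int) : ∀ m c, |m| < |c| → (∀ d ∈ ds, |d| ≤ |c|) →
    (∀ d ∈ ds, |d| = |c| → d = c) → c ∈ ds → pvBest m ds = c := by
  induction ds with
  | nil => intro m c _ _ _ hc; simp at hc
  | cons d t ih =>
    intro m c hm hb hu hc
    simp only [pvBest, List.foldl_cons]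
    by_cases hd : |d| = |c|
    · have hdc : d = c := hu d (by simp) hd
      have hs : pvStep m d = c := by unfold pvStep; rw [if_pos (by omega)]; exact hdc
      rw [hs]
      exact pvBest_keep t c (fun x hx => by have := hb x (by simp [hx]); omega)
    · have hdlt : |d| < |c| := lt_of_le_of_ne (hb d (by simp)) hd
      have hcne : c ≠ d := by intro h; rw [h] at hd; exact hd rfl
      have hct : c ∈ t := by
        rcases List.mem_cons.mp hc with h | h
        · exact absurd h hcne
        · exact h
      refine ih _ c ?_ (fun x hx => hb x (by simp [hx])) (fun x hx => hu x (by simp [hx])) hct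
      unfold pvStep
      split <;> omega

lemma pvPairs_bound (xs : List Int) : ∀ lo hi, (∀ y ∈ xs, lo ≤ y ∧ y ≤ hi) →
    ∀ d ∈ pvPairs xs, |d| ≤ hi - lo := by
  induction xs with
  | nil => intro lo hi _ d hd; simp [pvPairs] at hd
  | cons x r ih =>
    intro lo hi h d hd
    simp only [pvPairs, List.mem_append, List.mem_map] at hd
    rcases hd with ⟨y, hy, rfl⟩ | hd
    · have hx := h x (by simp)
      have hyb := h y (by simp [hy])
      rcases abs_cases (x - y) with ⟨he, _⟩ | ⟨he, _⟩ <;> omega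
    · exact ih lo hi (fun y hy => h y (by simp [hy])) d hd

lemma pvMax_le_of_le (r : List Int) : ∀ a b, a ≤ b → pvMax a r ≤ pvMax b r := by
  induction r with
  | nil => intro a b h; exact h
  | cons z t ih =>
    intro a b h
    simp only [pvMax, List.foldl_cons]
    exact ih _ _ (by omega)

lemma pvMin_le_of_le (r : List Int) : ∀ a b, a ≤ b → pvMin a r ≤ pvMin b r := by
  induction r with
  | nil => intro a b h; exact h
  | cons z t ih =>
    intro a b h
    simp only [pvMin, List.foldl_cons]
    exact ih _ _ (by omega)

lemma pvBounds (x : Int) (r : List Int) : ∀ y ∈ x :: r, pvMin x r ≤ y ∧ y ≤ pvMax x r := by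
  intro y hy
  rcases List.mem_cons.mp hy with rfl | hy
  · exact ⟨(PySem.List.foldl_min_le r y).1, (PySem.List.le_foldl_max r y).1⟩
  · exact ⟨(PySem.List.foldl_min_le r x).2 y hy, (PySem.List.le_foldl_max r x).2 y hy⟩

lemma pvMax_tail_le (x z : Int) (r : List Int) : pvMax z r ≤ pvMax x (z :: r) := by
  have h : pvMax x (z :: r) = pvMax (max x z) r := by simp [pvMax]
  rw [h]
  exact pvMax_le_of_le r z (max x z) (le_max_right x z)

lemma pvMin_tail_ge (x z : Int) (r : List Int) : pvMin x (z :: r) ≤ pvMin z r := by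
  have h : pvMin x (z :: r) = pvMin (min x z) r := by simp [pvMin]
  rw [h]
  exact pvMin_le_of_le r (min x z) z (min_le_right x z)

lemma pvMax_tail_eq (x z : Int) (r : List Int) (hmem : pvMax x (z :: r) ∈ z :: r) :
    pvMax z r = pvMax x (z :: r) := by
  have h1 := pvMax_tail_le x z r
  have h2 := (pvBounds z r _ hmem).2
  omega

lemma pvMin_tail_eq (x z : Int) (r : List Int) (hmem : pvMin x (z :: r) ∈ z :: r) :
    pvMin z r = pvMin x (z :: r) := by
  have h1 := pvMin_tail_ge x z r
  have h2 := (pvBounds z r _ hmem).1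
  omega

/-- Main characterisation of A's accumulator on the pair list. -/
lemma pvMain (xs : List Int) : ∀ m, pvBest m (pvPairs xs) = if pvD xs ≤ |m| then m else pvS xs := by
  induction xs with
  | nil => intro m; simp [pvPairs, pvBest, pvD, abs_nonneg]
  | cons x r ih =>
    intro m
    have hb := pvBounds x r
    have hxb := hb x (by simp)
    simp only [pvD, pvS]
    by_cases h1 : pvMax x r - pvMin x r ≤ |m|
    · rw [if_pos h1]
      exact pvBest_keep _ m (fun d hd => le_trans (pvPairs_bound (x :: r) _ _ hb d hd) h1)
    · rw [if_neg h1]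
      have habs : (0:Int) ≤ |m| := abs_nonneg m
      have hlt : |m| < pvMax x r - pvMin x r := by omega
      have hMne : ¬ pvMax x r = pvMin x r := by omega
      rw [if_neg hMne]
      have hsplit : pvBest m (pvPairs (x :: r)) =
          pvBest (pvBest m (r.map (fun y => x - y))) (pvPairs r) := by
        simp [pvPairs, pvBest, List.foldl_append]
      rw [hsplit]
      by_cases hxM : x = pvMax x r
      · rw [if_pos hxM]
        have hmnr : pvMin x r ∈ r := by
          rcases PySem.List.foldl_min_mem r x with h | h
          · exfalso; exact hMne (by simp only [pvMin] at *; omega)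
          · exact h
        have habs2 : |pvMax x r - pvMin x r| = pvMax x r - pvMin x r := abs_of_nonneg (by omega)
        have hinner : pvBest m (r.map (fun y => x - y)) = pvMax x r - pvMin x r := by
          refine pvBest_hit _ m _ (by omega) ?_ ?_ ?_
          · intro d hd
            rcases List.mem_map.mp hd with ⟨y, hy, rfl⟩
            have hyb := hb y (by simp [hy])
            have : |x - y| = x - y := abs_of_nonneg (by omega)
            omega
          · intro d hd hda
            rcases List.mem_map.mp hd with ⟨y, hy, rfl⟩
            have hyb := hb y (by simp [hy])
            have : |x - y| = x - y := abs_of_nonneg (by omega)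
            omega
          · exact List.mem_map.mpr ⟨pvMin x r, hmnr, by omega⟩
        rw [hinner, ih]
        have hDr : pvD r ≤ pvMax x r - pvMin x r := by
          cases r with
          | nil => simp only [pvD]; omega
          | cons z r' =>
            have h1' := pvMax_tail_le x z r'
            have h2' := pvMin_tail_ge x z r'
            simp only [pvD]; omega
        rw [if_pos (by omega)]
      · rw [if_neg hxM]
        by_cases hxmn : x = pvMin x r
        · rw [if_pos hxmn]
          have hMr : pvMax x r ∈ r := by
            rcases PySem.List.foldl_max_mem r x with h | h
            · exfalso; exact hxM (by simp only [pvMax] at *; omega)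
            · exact h
          have habs2 : |pvMin x r - pvMax x r| = -(pvMin x r - pvMax x r) := abs_of_nonpos (by omega)
          have hinner : pvBest m (r.map (fun y => x - y)) = pvMin x r - pvMax x r := by
            refine pvBest_hit _ m _ (by omega) ?_ ?_ ?_
            · intro d hd
              rcases List.mem_map.mp hd with ⟨y, hy, rfl⟩
              have hyb := hb y (by simp [hy])
              have : |x - y| = -(x - y) := abs_of_nonpos (by omega)
              omega
            · intro d hd hda
              rcases List.mem_map.mp hd with ⟨y, hy, rfl⟩
              have hyb := hb y (by simp [hy])
              have : |x - y| = -(x - y) := abs_of_nonpos (by omega)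
              omega
            · exact List.mem_map.mpr ⟨pvMax x r, hMr, by omega⟩
          rw [hinner, ih]
          have hDr : pvD r ≤ pvMax x r - pvMin x r := by
            cases r with
            | nil => simp only [pvD]; omega
            | cons z r' =>
              have h1' := pvMax_tail_le x z r'
              have h2' := pvMin_tail_ge x z r'
              simp only [pvD]; omega
          rw [if_pos (by omega)]
        · rw [if_neg hxmn]
          cases r with
          | nil => exact absurd rfl hMne
          | cons z r' =>
            have hMmem : pvMax x (z :: r') ∈ z :: r' := by
              rcases PySem.List.foldl_max_mem (z :: r') x with h | h
              · exact absurd h.symm (by simpa [pvMax] using hxM)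
              · exact h
            have hmnmem : pvMin x (z :: r') ∈ z :: r' := by
              rcases PySem.List.foldl_min_mem (z :: r') x with h | h
              · exact absurd h.symm (by simpa [pvMin] using hxmn)
              · exact h
            have hMr := pvMax_tail_eq x z r' hMmem
            have hmnr := pvMin_tail_eq x z r' hmnmem
            have hinnerb : |pvBest m ((z :: r').map (fun y => x - y))| ≤
                pvMax x (z :: r') - pvMin x (z :: r') - 1 := by
              refine pvBest_bound _ m _ (by omega) ?_
              intro d hd
              rcases List.mem_map.mp hd with ⟨y, hy, rfl⟩
              have hyb := hb y (by simp [hy])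
              rcases abs_cases (x - y) with ⟨he, _⟩ | ⟨he, _⟩ <;> omega
            rw [ih]
            have hcond : ¬ (pvD (z :: r') ≤ |pvBest m (List.map (fun y => x - y) (z :: r'))|) := by
              simp only [pvD]; omega
            rw [if_neg hcond]

/-- A's double index loop over Nat indices equals the accumulator run over the pair list. -/
lemma pvOuterNat (xs : List Int) : ∀ m : Int,
    (List.range xs.length).foldl
      (fun acc k => (xs.drop (k + 1)).foldl (fun a y => pvStep a (xs.getD k 0 - y)) acc) m
    = pvBest m (pvPairs xs) := by
  induction xs with
  | nil => intro m; simp [pvPairs, pvBest]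
  | cons x r ih =>
    intro m
    rw [List.length_cons, List.range_succ_eq_map, List.foldl_cons, List.foldl_map]
    have hbody : (fun (acc : Int) (k : Nat) =>
        ((x :: r).drop (k.succ + 1)).foldl (fun a y => pvStep a ((x :: r).getD k.succ 0 - y)) acc)
        = (fun (acc : Int) (k : Nat) =>
        (r.drop (k + 1)).foldl (fun a y => pvStep a (r.getD k 0 - y)) acc) := by
      funext acc k
      simp
    rw [hbody, ih]
    have hacc : ((x :: r).drop (0 + 1)).foldl (fun a y => pvStep a ((x :: r).getD 0 0 - y)) m
        = pvBest m (r.map (fun y => x - y)) := by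
      simp [pvBest, List.foldl_map]
    rw [hacc]
    simp [pvPairs, pvBest, List.foldl_append]

/-- A = characterised form -/
lemma pvA_eq (xs : List Int) : max_elevation_delta xs = pvBest 0 (pvPairs xs) := by
  have h : max_elevation_delta xs =
      (PySem.List.pyRange 0 (xs.length : Int) 1).foldl
        (fun acc i => (PySem.List.pyRange (i + 1) (xs.length : Int) 1).foldl
          (fun a j => pvStep a (PySem.List.pyGetD xs i 0 - PySem.List.pyGetD xs j 0)) acc) 0 := rfl
  rw [h]
  have h2 : ∀ acc : Int, ∀ i ∈ PySem.List.pyRange 0 (xs.length : Int) 1,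
      (PySem.List.pyRange (i + 1) (xs.length : Int) 1).foldl
        (fun a j => pvStep a (PySem.List.pyGetD xs i 0 - PySem.List.pyGetD xs j 0)) acc
      = (xs.drop (i + 1).toNat).foldl (fun a y => pvStep a (PySem.List.pyGetD xs i 0 - y)) acc := by
    intro acc i hi
    have h0 : (0 : Int) ≤ i := (PySem.List.mem_pyRange_one.mp hi).1
    exact PySem.List.foldl_pyRange_pyGetD' xs 0 (fun a y => pvStep a (PySem.List.pyGetD xs i 0 - y)) acc (by omega)
  refine Eq.trans (PySem.List.foldl_congr_mem _ _
    (fun acc i => (xs.drop (i + 1).toNat).foldl (fun a y => pvStep a (PySem.List.pyGetD xs i 0 - y)) acc)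
    0 h2) ?_
  -- now shift to Nat indices
  rw [PySem.List.pyRange_zero_nat]
  rw [List.foldl_map]
  have hbody : (fun (acc : Int) (k : Nat) =>
      (xs.drop ((k : Int) + 1).toNat).foldl (fun a y => pvStep a (PySem.List.pyGetD xs (k : Int) 0 - y)) acc)
      = (fun (acc : Int) (k : Nat) =>
      (xs.drop (k + 1)).foldl (fun a y => pvStep a (xs.getD k 0 - y)) acc) := by
    funext acc k
    have h1 : ((k : Int) + 1).toNat = k + 1 := by omega
    rw [h1, PySem.List.pyGetD_natCast]
  rw [hbody]
  exact pvOuterNat xs 0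

/-- B's sign test agrees with pvS. -/
lemma pvSign (xs : List Int) : ∀ hi lo iH iL, hi ∈ xs → lo ∈ xs →
    (∀ y ∈ xs, lo ≤ y ∧ y ≤ hi) → hi ≠ lo →
    PySem.List.index? xs hi = some iH → PySem.List.index? xs lo = some iL →
    (if iH < iL then hi - lo else lo - hi) = pvS xs := by
  induction xs with
  | nil => intro hi lo iH iL h; simp at h
  | cons x r ih =>
    intro hi lo iH iL hhi hlo hb hne hIH hIL
    have hbx := hb x (by simp)
    have hMx : pvMax x r = hi := by
      have h1 : hi ≤ pvMax x r := (pvBounds x r hi hhi).2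
      have h2 : pvMax x r ≤ hi := by
        have hm : pvMax x r ∈ x :: r := by
          rcases PySem.List.foldl_max_mem r x with h | h
          · simp only [pvMax, h]; simp
          · simp only [pvMax]; exact List.mem_cons_of_mem x h
        exact (hb _ hm).2
      omega
    have hMn : pvMin x r = lo := by
      have h1 : pvMin x r ≤ lo := (pvBounds x r lo hlo).1
      have h2 : lo ≤ pvMin x r := by
        have hm : pvMin x r ∈ x :: r := by
          rcases PySem.List.foldl_min_mem r x with h | h
          · simp only [pvMin, h]; simp
          · simp only [pvMin]; exact List.mem_cons_of_mem x h
        exact (hb _ hm).1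
      omega
    simp only [pvS, hMx, hMn]
    rw [if_neg hne]
    by_cases hxhi : x = hi
    · rw [if_pos hxhi]
      have hxlo : x ≠ lo := by rw [hxhi]; exact hne
      have hiH0 : iH = 0 := by
        rw [hxhi, PySem.List.index?_cons_self] at hIH
        exact (Option.some_inj.mp hIH).symm
      have hlor : lo ∈ r := by
        rcases List.mem_cons.mp hlo with h | h
        · exact absurd h.symm hxlo
        · exact h
      have : ∃ k, PySem.List.index? r lo = some k ∧ iL = k + 1 := by
        rw [PySem.List.index?_cons_of_ne r hxlo] at hIL
        rcases Option.map_eq_some_iff.mp hIL with ⟨k, hk, hk2⟩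
        exact ⟨k, hk, hk2.symm⟩
      rcases this with ⟨k, _, rfl⟩
      rw [if_pos (by omega)]
    · rw [if_neg hxhi]
      have hhir : hi ∈ r := by
        rcases List.mem_cons.mp hhi with h | h
        · exact absurd h.symm hxhi
        · exact h
      have hkH : ∃ k, PySem.List.index? r hi = some k ∧ iH = k + 1 := by
        rw [PySem.List.index?_cons_of_ne r hxhi] at hIH
        rcases Option.map_eq_some_iff.mp hIH with ⟨k, hk, hk2⟩
        exact ⟨k, hk, hk2.symm⟩
      by_cases hxlo : x = lo
      · rw [if_pos hxlo]
        have hiL0 : iL = 0 := by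
          rw [hxlo, PySem.List.index?_cons_self] at hIL
          exact (Option.some_inj.mp hIL).symm
        rcases hkH with ⟨k, _, rfl⟩
        rw [if_neg (by omega)]
      · rw [if_neg hxlo]
        have hlor : lo ∈ r := by
          rcases List.mem_cons.mp hlo with h | h
          · exact absurd h.symm hxlo
          · exact h
        have hkL : ∃ k, PySem.List.index? r lo = some k ∧ iL = k + 1 := by
          rw [PySem.List.index?_cons_of_ne r hxlo] at hIL
          rcases Option.map_eq_some_iff.mp hIL with ⟨k, hk, hk2⟩
          exact ⟨k, hk, hk2.symm⟩
        rcases hkH with ⟨kH, hkH', rfl⟩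
        rcases hkL with ⟨kL, hkL', rfl⟩
        have hiff : (if kH + 1 < kL + 1 then hi - lo else lo - hi)
            = (if kH < kL then hi - lo else lo - hi) := by
          by_cases h : kH < kL
          · rw [if_pos (by omega), if_pos h]
          · rw [if_neg (by omega), if_neg h]
        rw [hiff]
        exact ih hi lo kH kL hhir hlor (fun y hy => hb y (by simp [hy])) hne hkH' hkL'

lemma pvB_eq (xs : List Int) : max_elevation_delta_alt xs = if pvD xs ≤ 0 then 0 else pvS xs := by
  cases xs with
  | nil => simp [max_elevation_delta_alt, pvD]
  | cons x r =>
    have hb := pvBounds x r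
    have hmax : PySem.List.max? (x :: r) (fun y => y) = some (pvMax x r) :=
      PySem.List.max?_id_cons x r
    have hmin : PySem.List.min? (x :: r) (fun y => y) = some (pvMin x r) :=
      PySem.List.min?_id_cons x r
    have hxb := hb x (by simp)
    by_cases heq : pvMax x r = pvMin x r
    · have hD : pvD (x :: r) ≤ 0 := by simp only [pvD]; omega
      rw [if_pos hD]
      simp only [max_elevation_delta_alt, hmax, hmin]
      rw [if_neg (by simp)]
      rw [if_pos heq]
    · have hD : ¬ pvD (x :: r) ≤ 0 := by simp only [pvD]; omega
      rw [if_neg hD]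
      have hMmem : pvMax x r ∈ x :: r := by
        rcases PySem.List.foldl_max_mem r x with h | h
        · simp only [pvMax, h]; simp
        · simp only [pvMax]; exact List.mem_cons_of_mem x h
      have hmnmem : pvMin x r ∈ x :: r := by
        rcases PySem.List.foldl_min_mem r x with h | h
        · simp only [pvMin, h]; simp
        · simp only [pvMin]; exact List.mem_cons_of_mem x h
      rcases Option.isSome_iff_exists.mp ((PySem.List.index?_isSome_iff (x :: r) (pvMax x r)).mpr hMmem) with ⟨iH, hIH⟩
      rcases Option.isSome_iff_exists.mp ((PySem.List.index?_isSome_iff (x :: r) (pvMin x r)).mpr hmnmem) with ⟨iL, hIL⟩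
      simp only [max_elevation_delta_alt, hmax, hmin]
      rw [if_neg (by simp)]
      rw [if_neg heq]
      rw [hIH, hIL]
      exact pvSign (x :: r) (pvMax x r) (pvMin x r) iH iL hMmem hmnmem hb heq hIH hIL

-- ===== VERDICT (by name: the statement is the Claim_ definition above) =====
theorem max_elevation_delta_spec : Claim_equal_max_elevation_delta := by
  intro xs _
  unfold Spec_max_elevation_delta
  rw [pvA_eq, pvMain, pvB_eq]
  simp
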